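-- pv_equiv track=rewrite | github.com/NiLaScience/NLM | ancients/clean_gutenberg_texts.py | remove_toc_blocks
-- ===== SOURCE A (Python) =====
-- def remove_toc_blocks(text: str) -> str:
--     # Remove simple Table of Contents sections
--     lines = text.splitlines()
--     out = []
--     skipping = False
--     seen_header = False
--     for line in lines:
--         l = line.strip().lower()
--         if not skipping and (l.startswith("contents") or l.startswith("table of contents")):
--             skipping = True
--             seen_header = True
--             continue
--         if skipping:
--             if not line.strip() and seen_header:
--                 skipping = False
--                 seen_header = False
--             continue
--         out.append(line)
--     return "\n".join(out)
-- ===== SOURCE B (Python) =====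
-- def remove_toc_blocks(text: str) -> str:
--     # Cursor-based scan: on a TOC header, consume the block with an inner loop.
--     lines = text.splitlines()
--     out = []
--     i = 0
--     n = len(lines)
--     while i < n:
--         l = lines[i].strip().lower()
--         if l.startswith("contents") or l.startswith("table of contents"):
--             i += 1
--             while i < n and lines[i].strip():
--                 i += 1
--             if i < n:
--                 i += 1  # drop the terminating blank line
--         else:
--             out.append(lines[i])
--             i += 1
--     return "\n".join(out)
-- ===== Notes on version B (the rewrite author's own statement) =====
-- stated objective: simpler
-- what changed: Replaces the skipping/seen_header flag machinery of the single for-loop with an index cursor and an inner block-consuming while-loop that eats the TOC body and its terminating blank line in one place.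
import Mathlib
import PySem

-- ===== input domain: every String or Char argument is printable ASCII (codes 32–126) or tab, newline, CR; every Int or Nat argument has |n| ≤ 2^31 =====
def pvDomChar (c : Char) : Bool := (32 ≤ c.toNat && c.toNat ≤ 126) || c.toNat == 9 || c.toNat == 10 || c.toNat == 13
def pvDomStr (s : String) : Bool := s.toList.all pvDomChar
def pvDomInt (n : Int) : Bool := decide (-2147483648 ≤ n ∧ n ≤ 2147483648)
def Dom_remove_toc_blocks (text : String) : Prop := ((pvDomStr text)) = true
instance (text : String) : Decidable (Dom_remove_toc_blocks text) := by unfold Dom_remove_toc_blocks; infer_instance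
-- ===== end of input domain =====

-- B replaces A's skipping/seen_header flags with a cursor and an inner block-consuming loop (objective: simpler).

-- ===== PORT A =====
-- one fold step of A's for-loop; state = (out, skipping, seen_header)
def tocStepA (st : List String × Bool × Bool) (line : String) : List String × Bool × Bool :=
  let out := st.1
  let skipping := st.2.1
  let seen := st.2.2
  let l := PySem.Str.lower (PySem.Str.strip line)
  if !skipping && (PySem.Str.startswith l "contents" || PySem.Str.startswith l "table of contents") then
    (out, true, true)
  else if skipping then
    if PySem.Str.strip line == "" && seen then (out, false, false) else (out, skipping, seen)
  else
    (out ++ [line], skipping, seen)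

def remove_toc_blocks (text : String) : String :=
  let lines := PySem.Str.splitlines text
  let res := lines.foldl tocStepA ([], false, false)
  PySem.Str.join "\n" res.1

-- ===== PORT B =====
-- the TOC-header test (shared phrasing of the same source expression)
def tocIsHeader (line : String) : Bool :=
  let l := PySem.Str.lower (PySem.Str.strip line)
  PySem.Str.startswith l "contents" || PySem.Str.startswith l "table of contents"

-- B's inner while-loop: consume non-blank body lines, then the blank line if any
def tocSkipBody : List String → List String
  | [] => []
  | l :: rest => if PySem.Str.strip l == "" then rest else tocSkipBody rest

theorem tocSkipBody_len_le (ls : List String) : (tocSkipBody ls).length ≤ ls.length := by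
  induction ls with
  | nil => simp [tocSkipBody]
  | cons l rest ih =>
    simp only [tocSkipBody]
    split
    · simp
    · exact le_trans ih (Nat.le_succ _)

-- B's outer while-loop over the cursor (the list tail plays the cursor)
def tocScanB : List String → List String
  | [] => []
  | l :: rest =>
    if tocIsHeader l then tocScanB (tocSkipBody rest)
    else l :: tocScanB rest
termination_by ls => ls.length
decreasing_by
  · exact Nat.lt_succ_of_le (tocSkipBody_len_le rest)
  · simp

def remove_toc_blocks_alt (text : String) : String :=
  PySem.Str.join "\n" (tocScanB (PySem.Str.splitlines text))

-- ===== PRECONDITION & SPEC =====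
def Spec_remove_toc_blocks (text : String) (out : String) : Prop := out = remove_toc_blocks_alt text
instance (text : String) (out : String) : Decidable (Spec_remove_toc_blocks text out) := by unfold Spec_remove_toc_blocks; infer_instance

-- ===== CLAIM (what is proved, stated in full; the proofs are below) =====
def Claim_equal_remove_toc_blocks : Prop := ∀ (text : String), Dom_remove_toc_blocks text → Spec_remove_toc_blocks text (remove_toc_blocks text)

-- ===== LEMMAS AND PROOFS =====
theorem tocScanB_nil : tocScanB [] = [] := by rw [tocScanB]

theorem tocScanB_cons (l : String) (rest : List String) :
    tocScanB (l :: rest) = if tocIsHeader l then tocScanB (tocSkipBody rest) else l :: tocScanB rest := by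
  rw [tocScanB]

theorem tocStepA_idle (out : List String) (l : String) :
    tocStepA (out, false, false) l = if tocIsHeader l then (out, true, true) else (out ++ [l], false, false) := by
  simp only [tocStepA, tocIsHeader, Bool.not_false, Bool.true_and]
  split <;> simp_all

theorem tocStepA_skip (out : List String) (l : String) :
    tocStepA (out, true, true) l = if PySem.Str.strip l == "" then (out, false, false) else (out, true, true) := by
  simp only [tocStepA, Bool.not_true, Bool.false_and, Bool.false_eq_true, if_false, if_true,
    Bool.and_true]

-- Joint loop invariant: A's fold from the non-skipping state produces out ++ tocScanB ls,
-- and from the skipping state it produces out ++ tocScanB (tocSkipBody ls).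
theorem tocFold_inv (ls : List String) : ∀ (out : List String),
    (ls.foldl tocStepA (out, false, false)).1 = out ++ tocScanB ls ∧
    (ls.foldl tocStepA (out, true, true)).1 = out ++ tocScanB (tocSkipBody ls) := by
  induction ls with
  | nil => intro out; simp [tocScanB_nil, tocSkipBody]
  | cons l rest ih =>
    intro out
    constructor
    · rw [List.foldl_cons, tocStepA_idle, tocScanB_cons]
      by_cases h : tocIsHeader l = true
      · simp only [h, if_true]
        exact (ih out).2
      · simp only [h, if_false, Bool.false_eq_true]
        have := (ih (out ++ [l])).1
        simpa using this
    · rw [List.foldl_cons, tocStepA_skip]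
      by_cases hb : (PySem.Str.strip l == "") = true
      · simp only [hb, if_true, tocSkipBody]
        exact (ih out).1
      · simp only [hb, if_false, tocSkipBody, Bool.false_eq_true]
        exact (ih out).2

-- ===== VERDICT (by name: the statement is the Claim_ definition above) =====
theorem remove_toc_blocks_spec : Claim_equal_remove_toc_blocks := by
  intro text _
  unfold Spec_remove_toc_blocks remove_toc_blocks remove_toc_blocks_alt
  have h := (tocFold_inv (PySem.Str.splitlines text) []).1
  simpa using congrArg (PySem.Str.join "\n") h
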